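-- pv_equiv track=rewrite | github.com/jSogs/hedge-api | services/api/app/routers/chat.py | _tokenize_for_relevance
-- ===== SOURCE A (Python) =====
-- from typing import List, Optional, Dict, Any
--
-- def _tokenize_for_relevance(text: str) -> List[str]:
--     text = (text or "").lower()
--     for ch in "()[]{}.,:;!?/\\\"'`":
--         text = text.replace(ch, " ")
--     parts = [p for p in text.split() if p]
--     stop = {
--         "the","a","an","and","or","to","of","in","on","for","with","by","at","from","as",
--         "will","be","is","are","was","were","it","this","that","these","those",
--         "above","below","over","under",
--         "price","prices",  # keep query meaningful; we can treat price words as low-signal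
--         "market","markets","prediction","hedge","hedges","hedging",
--         "fetch","search","find","show","get","give","me","some","more","please",
--     }
--     return [p for p in parts if p not in stop and len(p) > 2]
-- ===== SOURCE B (Python) =====
-- def _tokenize_for_relevance(text):
--     seps = set("()[]{}.,:;!?/\\\"'`")
--     stop = frozenset({
--         "the","a","an","and","or","to","of","in","on","for","with","by","at","from","as",
--         "will","be","is","are","was","were","it","this","that","these","those",
--         "above","below","over","under",
--         "price","prices",
--         "market","markets","prediction","hedge","hedges","hedging",
--         "fetch","search","find","show","get","give","me","some","more","please",
--     })
--     tokens = []
--     buf = []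
--     for ch in (text or "").lower():
--         if ch in seps or ch.isspace():
--             if buf:
--                 tokens.append("".join(buf))
--                 buf = []
--         else:
--             buf.append(ch)
--     if buf:
--         tokens.append("".join(buf))
--     return [t for t in tokens if t not in stop and len(t) > 2]
-- ===== Notes on version B (the rewrite author's own statement) =====
-- stated objective: alternative
-- what changed: B replaces A's 14 successive full-string replace passes followed by split() with a single character scan that maintains a current-token buffer and flushes it at punctuation/whitespace, then applies the same stopword/length filter.
import Mathlib
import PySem

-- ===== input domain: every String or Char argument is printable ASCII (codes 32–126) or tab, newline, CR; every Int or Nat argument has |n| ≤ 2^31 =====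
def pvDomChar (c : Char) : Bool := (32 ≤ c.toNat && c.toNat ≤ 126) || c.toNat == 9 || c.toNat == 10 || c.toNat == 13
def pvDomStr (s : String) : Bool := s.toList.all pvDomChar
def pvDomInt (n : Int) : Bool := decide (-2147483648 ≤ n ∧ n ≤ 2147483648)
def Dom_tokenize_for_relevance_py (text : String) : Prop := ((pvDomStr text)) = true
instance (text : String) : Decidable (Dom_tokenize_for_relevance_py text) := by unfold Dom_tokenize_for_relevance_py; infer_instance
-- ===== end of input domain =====

-- B fuses A's 14 successive replace passes and the split into one character scan (alternative decomposition, one pass over the text).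

-- shared stop-word set (the Python `stop` literal)
def pvStop : List String :=
  ["the","a","an","and","or","to","of","in","on","for","with","by","at","from","as",
   "will","be","is","are","was","were","it","this","that","these","those",
   "above","below","over","under",
   "price","prices",
   "market","markets","prediction","hedge","hedges","hedging",
   "fetch","search","find","show","get","give","me","some","more","please"]

-- ===== PORT A =====
def pvSepA : List Char := "()[]{}.,:;!?/\\\"'`".toList

def tokenize_for_relevance_py (text : String) : List String :=
  let t0 := PySem.Chars.lower text.toList
  let t1 := pvSepA.foldl (fun s ch => PySem.Chars.replace s [ch] [' ']) t0
  let parts := (PySem.Chars.split₀ t1).filter (fun p => !p.isEmpty)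
  (parts.filter (fun p => !(pvStop.contains (String.ofList p)) && decide (p.length > 2))).map String.ofList

-- ===== PORT B =====
def pvSepB : List Char := "()[]{}.,:;!?/\\\"'`".toList

def pvIsSepB (c : Char) : Bool := pvSepB.contains c || PySem.Chars.isspace c

-- the single-pass scan of Source B: current-token buffer, flush on separator/whitespace
def pvScanB : List Char → List Char → List (List Char)
  | [], buf => if buf.isEmpty then [] else [buf]
  | c :: rest, buf =>
      if pvIsSepB c then
        (if buf.isEmpty then pvScanB rest [] else buf :: pvScanB rest [])
      else pvScanB rest (buf ++ [c])

def tokenize_for_relevance_py_alt (text : String) : List String :=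
  let toks := pvScanB (PySem.Chars.lower text.toList) []
  (toks.filter (fun p => !(pvStop.contains (String.ofList p)) && decide (p.length > 2))).map String.ofList

-- ===== PRECONDITION & SPEC =====
def Spec_tokenize_for_relevance_py (text : String) (out : List String) : Prop := out = tokenize_for_relevance_py_alt text
instance (text : String) (out : List String) : Decidable (Spec_tokenize_for_relevance_py text out) := by unfold Spec_tokenize_for_relevance_py; infer_instance

-- ===== CLAIM (what is proved, stated in full; the proofs are below) =====
def Claim_equal_tokenize_for_relevance_py : Prop := ∀ (text : String), Dom_tokenize_for_relevance_py text → Spec_tokenize_for_relevance_py text (tokenize_for_relevance_py text)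

-- ===== LEMMAS AND PROOFS =====

-- replace of a single character by ' ' is a pointwise map
theorem pv_replace_go_single (ch : Char) (fuel : Nat) (l acc : List Char)
    (h : l.length ≤ fuel) :
    PySem.Chars.replace.go [ch] [' '] fuel l acc
      = acc.reverse ++ l.map (fun c => if c == ch then ' ' else c) := by
  induction fuel generalizing l acc with
  | zero =>
    cases l with
    | nil => simp [PySem.Chars.replace.go]
    | cons c t => simp at h
  | succ fuel ih =>
    cases l with
    | nil => simp [PySem.Chars.replace.go]
    | cons c t =>
      simp only [PySem.Chars.replace.go, List.map_cons]
      by_cases hc : c = ch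
      · subst hc
        have hpre : [c].isPrefixOf (c :: t) = true := by simp [List.isPrefixOf]
        rw [hpre]
        simp only [List.length_cons] at h
        rw [ih _ _ (by simpa using Nat.le_of_succ_le_succ h)]
        simp
      · have hpre : [ch].isPrefixOf (c :: t) = false := by
          simp [List.isPrefixOf]; exact fun hh => (hc hh.symm).elim
        rw [hpre]
        simp only [List.length_cons] at h
        rw [ih _ _ (Nat.le_of_succ_le_succ h)]
        simp [hc]

theorem pv_replace_single (s : List Char) (ch : Char) :
    PySem.Chars.replace s [ch] [' '] = s.map (fun c => if c == ch then ' ' else c) := by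
  simpa [PySem.Chars.replace] using pv_replace_go_single ch s.length s [] (le_refl _)

-- the 14-pass replace fold is one map with the combined separator set
theorem pv_fold_replace (seps : List Char) (t : List Char) :
    seps.foldl (fun s ch => PySem.Chars.replace s [ch] [' ']) t
      = t.map (fun c => if seps.contains c then ' ' else c) := by
  induction seps generalizing t with
  | nil => simp
  | cons ch rest ih =>
    simp only [List.foldl_cons]
    rw [pv_replace_single, ih, List.map_map]
    apply List.map_congr_left
    intro c _
    by_cases hc : c = ch
    · subst hc; simp
    · simp [hc, Function.comp]

-- split₀ on the mapped text is B's scan on the raw text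
theorem pv_scan_eq (l : List Char) (cur : List Char) (acc : List (List Char)) :
    PySem.Chars.split₀.go (l.map (fun c => if pvSepA.contains c then ' ' else c)) cur acc
      = acc.reverse ++ pvScanB l cur.reverse := by
  induction l generalizing cur acc with
  | nil =>
    cases cur with
    | nil => simp [PySem.Chars.split₀.go, pvScanB]
    | cons c t => simp [PySem.Chars.split₀.go, pvScanB]
  | cons c rest ih =>
    simp only [List.map_cons, PySem.Chars.split₀.go]
    have hAB : pvSepB = pvSepA := rfl
    by_cases hc : pvSepA.contains c = true
    · have hsep : pvIsSepB c = true := by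
        simp [pvIsSepB, hAB]
        exact Or.inl (by simpa using hc)
      rw [if_pos hc]
      have hsp : PySem.Chars.isspace ' ' = true := by decide
      rw [if_pos hsp]
      cases cur with
      | nil =>
        simp only [List.isEmpty_nil, if_pos]
        rw [ih [] acc]
        simp [pvScanB, hsep]
      | cons x xs =>
        simp only [List.isEmpty_cons, Bool.false_eq_true, if_false]
        rw [ih [] ((x :: xs).reverse :: acc)]
        simp [pvScanB, hsep]
    · have hc' : pvSepA.contains c = false := by simpa using hc
      rw [if_neg hc]
      by_cases hs : PySem.Chars.isspace c = true
      · have hsep : pvIsSepB c = true := by simp [pvIsSepB, hs]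
        rw [if_pos hs]
        cases cur with
        | nil =>
          simp only [List.isEmpty_nil, if_pos]
          rw [ih [] acc]
          simp [pvScanB, hsep]
        | cons x xs =>
          simp only [List.isEmpty_cons, Bool.false_eq_true, if_false]
          rw [ih [] ((x :: xs).reverse :: acc)]
          simp [pvScanB, hsep]
      · have hs' : PySem.Chars.isspace c = false := by simpa using hs
        have hsep : pvIsSepB c = false := by
          simp [pvIsSepB, hAB, hs']
          simpa using hc'
        rw [if_neg hs]
        rw [ih (c :: cur) acc]
        simp [pvScanB, hsep]

-- ===== VERDICT (by name: the statement is the Claim_ definition above) =====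
theorem tokenize_for_relevance_py_spec : Claim_equal_tokenize_for_relevance_py := by
  intro text _
  unfold Spec_tokenize_for_relevance_py tokenize_for_relevance_py tokenize_for_relevance_py_alt
  simp only []
  rw [pv_fold_replace]
  unfold PySem.Chars.split₀
  rw [pv_scan_eq]
  simp only [List.reverse_nil, List.nil_append]
  rw [List.filter_filter]
  congr 1
  apply List.filter_congr
  intro p _
  by_cases hp : (!(pvStop.contains (String.ofList p)) && decide (p.length > 2)) = true
  · rw [hp]
    have : p.isEmpty = false := by
      simp at hp
      cases p with
      | nil => simp at hp
      | cons a b => simp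
    simp [this]
  · simp only [Bool.not_eq_true] at hp
    rw [hp]
    simp
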